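-- pv_equiv track=rewrite | github.com/superpowers04/haxe-sublime-bundle | features/haxe_parse_helper.py | find_line_positions
-- ===== SOURCE A (Python) =====
-- def find_line_positions(src):
--     lines = src.split('\n')
--     pos = 0
--     positions = []
--     for line in lines:
--         pos += len(line) + 1
--         positions.append(pos)
--     return positions
-- ===== SOURCE B (Python) =====
-- def find_line_positions(src):
--     positions = [i + 1 for i, c in enumerate(src) if c == '\n']
--     positions.append(len(src) + 1)
--     return positions
-- ===== Notes on version B (the rewrite author's own statement) =====
-- stated objective: alternative
-- what changed: B scans the string once collecting index+1 for each newline and appends len(src)+1, instead of splitting into line substrings and accumulating their lengths; it trades C-optimized split() for a direct scan with no substring allocation.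
import Mathlib
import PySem

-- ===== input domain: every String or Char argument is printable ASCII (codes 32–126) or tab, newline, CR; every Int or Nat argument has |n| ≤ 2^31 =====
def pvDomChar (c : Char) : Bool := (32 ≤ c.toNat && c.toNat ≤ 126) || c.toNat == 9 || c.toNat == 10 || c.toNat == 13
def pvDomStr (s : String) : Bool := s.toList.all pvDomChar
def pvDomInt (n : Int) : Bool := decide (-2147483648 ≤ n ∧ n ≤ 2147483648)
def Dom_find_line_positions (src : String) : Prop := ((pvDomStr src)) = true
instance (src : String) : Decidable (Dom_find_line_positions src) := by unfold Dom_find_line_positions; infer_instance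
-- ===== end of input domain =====

-- B: single scan collecting index+1 per newline plus a final len+1, instead of split("\n") with length accumulation (alternative decomposition, same O(n)).

-- ===== PORT A =====
-- A: lines = src.split('\n'); pos = 0; positions = []; for line in lines: pos += len(line)+1; positions.append(pos)
def find_line_positions (src : String) : List Int :=
  let lines := (PySem.Str.split? src "\n").getD []
  (lines.foldl (fun (st : Int × List Int) line =>
      let pos := st.1 + PySem.Str.len line + 1
      (pos, st.2 ++ [pos])) ((0 : Int), ([] : List Int))).2

-- ===== PORT B =====
-- B: [i+1 for i, c in enumerate(src) if c == '\n'] + [len(src)+1]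
def find_line_positions_alt (src : String) : List Int :=
  (((PySem.List.enumerate src.toList 0).filter (fun p => p.2 == '\n')).map (fun p => p.1 + 1))
    ++ [PySem.Str.len src + 1]

-- ===== PRECONDITION & SPEC =====
def Spec_find_line_positions (src : String) (out : List Int) : Prop := out = find_line_positions_alt src
instance (src : String) (out : List Int) : Decidable (Spec_find_line_positions src out) := by unfold Spec_find_line_positions; infer_instance

-- ===== CLAIM (what is proved, stated in full; the proofs are below) =====
def Claim_equal_find_line_positions : Prop := ∀ (src : String), Dom_find_line_positions src → Spec_find_line_positions src (find_line_positions src)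

-- ===== LEMMAS AND PROOFS =====

/-- Structural form of splitting a char list at '\n'. -/
def splitNl : List Char → List Char → List (List Char)
  | [], cur => [cur.reverse]
  | c :: rest, cur =>
    if c == '\n' then cur.reverse :: splitNl rest [] else splitNl rest (c :: cur)

lemma splitOn_go_nl (fuel : Nat) (l cur : List Char) (acc : List (List Char))
    (h : l.length ≤ fuel) :
    PySem.Chars.splitOn.go ['\n'] fuel l cur acc = acc.reverse ++ splitNl l cur := by
  induction fuel generalizing l cur acc with
  | zero =>
    have : l = [] := List.eq_nil_of_length_eq_zero (Nat.le_zero.mp h)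
    subst this
    simp [PySem.Chars.splitOn.go, splitNl]
  | succ n ih =>
    cases l with
    | nil => simp [PySem.Chars.splitOn.go, splitNl]
    | cons c rest =>
      by_cases hc : c = '\n'
      · subst hc
        rw [PySem.Chars.splitOn.go]
        have hpre : List.isPrefixOf ['\n'] ('\n' :: rest) = true := by
          simp [List.isPrefixOf]
        simp only [hpre, if_true, List.length, List.drop]
        rw [ih rest [] ((cur.reverse) :: acc) (by simpa using Nat.le_of_succ_le_succ h)]
        simp [splitNl]
      · rw [PySem.Chars.splitOn.go]
        have hpre : List.isPrefixOf ['\n'] (c :: rest) = false := by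
          simp [List.isPrefixOf]
          intro h'; exact absurd h'.symm hc
        simp only [hpre, Bool.false_eq_true, if_false]
        rw [ih rest (c :: cur) acc (Nat.le_of_succ_le_succ h)]
        simp [splitNl, hc]

lemma splitOn_nl (l : List Char) : PySem.Chars.splitOn l ['\n'] = splitNl l [] := by
  have := splitOn_go_nl (l.length + 1) l [] [] (Nat.le_succ _)
  simpa [PySem.Chars.splitOn] using this

/-- Cons-structured version of A's accumulation loop. -/
def runA : List (List Char) → Int → List Int
  | [], _ => []
  | line :: rest, pos => (pos + line.length + 1) :: runA rest (pos + line.length + 1)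

lemma foldl_runA (lines : List (List Char)) (pos : Int) (acc : List Int) :
    (lines.foldl (fun (st : Int × List Int) line =>
        (st.1 + (line.length : Int) + 1, st.2 ++ [st.1 + (line.length : Int) + 1]))
      (pos, acc)).2 = acc ++ runA lines pos := by
  induction lines generalizing pos acc with
  | nil => simp [runA]
  | cons line rest ih => simp [List.foldl, runA, ih, List.append_assoc]

/-- B's scan, started at an arbitrary offset. -/
def runB (l : List Char) (s : Int) : List Int :=
  (((PySem.List.enumerate l s).filter (fun p => p.2 == '\n')).map (fun p => p.1 + 1))
    ++ [s + l.length + 1]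

lemma runA_splitNl (l cur : List Char) (pos : Int) :
    runA (splitNl l cur) pos = runB l (pos + cur.length) := by
  induction l generalizing cur pos with
  | nil =>
    simp [splitNl, runA, runB, PySem.List.enumerate_nil]
  | cons c rest ih =>
    by_cases hc : c = '\n'
    · subst hc
      simp only [splitNl]
      rw [if_pos (by simp), runA]
      simp only [List.length_reverse]
      rw [ih [] (pos + cur.length + 1)]
      simp [runB, PySem.List.enumerate_cons]
      omega
    · simp only [splitNl]
      rw [if_neg (by simp [hc]), ih (c :: cur) pos]
      unfold runB
      simp only [PySem.List.enumerate_cons, List.filter_cons, List.length_cons,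
        show ((c == '\n') = true) = False by simp [hc], if_false]
      push_cast
      ring_nf

-- ===== VERDICT (by name: the statement is the Claim_ definition above) =====
theorem find_line_positions_spec : Claim_equal_find_line_positions := by
  intro src _
  unfold Spec_find_line_positions find_line_positions find_line_positions_alt
  have hsplit : (PySem.Str.split? src "\n").getD [] = (splitNl src.toList []).map String.ofList := by
    have h := PySem.Str.split?_map src "\n"
    rw [show ("\n" : String).toList = ['\n'] from rfl] at h
    rw [PySem.Chars.split?] at h
    rw [splitOn_nl] at h
    simp only [List.isEmpty, Bool.false_eq_true, if_false] at h
    cases hs : PySem.Str.split? src "\n" with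
    | none => rw [hs] at h; simp at h
    | some parts =>
      rw [hs] at h; simp at h
      simp only [Option.getD_some]
      calc parts = (parts.map String.toList).map String.ofList := by
              simp [List.map_map, Function.comp_def, String.ofList_toList]
        _ = (splitNl src.toList []).map String.ofList := by rw [h]
  rw [hsplit]
  have hlen : ∀ line : List Char, PySem.Str.len (String.ofList line) = (line.length : Int) := by
    intro line; rw [PySem.Str.len_eq]; simp
  have hfold :
      ((((splitNl src.toList []).map String.ofList).foldl (fun (st : Int × List Int) line =>
        (st.1 + PySem.Str.len line + 1, st.2 ++ [st.1 + PySem.Str.len line + 1]))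
        ((0 : Int), ([] : List Int))).2)
      = runA (splitNl src.toList []) 0 := by
    rw [List.foldl_map]
    have := foldl_runA (splitNl src.toList []) 0 []
    simp only [hlen]
    simpa using this
  simp only []
  rw [hfold, runA_splitNl src.toList [] 0]
  simp [runB, PySem.Str.len_eq]
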